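-- pv_equiv track=rewrite | github.com/audreyli/multidimensionalminesweeper | lab.py | get_all_locs
-- ===== SOURCE A (Python) =====
-- def get_all_locs(dims):
--     """Gets all location coordinates of a board
--
--     Args:
--         dims (list of ints)
--
--     Returns:
--         list of locations (list of tuples)
--
--     >>> get_all_locs([1,2])
--     [(0, 0), (0, 1)]
--     """
--     if len(dims) == 1:
--         return [(i,) for i in range(dims[0])]
--     else:
--         temp = get_all_locs(dims[1:])
--         all = []
--         for i in range(dims[0]):
--             all.extend([(i,) + n for n in temp])
--         return all
-- ===== SOURCE B (Python) =====
-- def get_all_locs(dims):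
--     result = [()]
--     for d in reversed(dims):
--         result = [(i,) + r for i in range(d) for r in result]
--     return result
-- ===== Notes on version B (the rewrite author's own statement) =====
-- stated objective: faster
-- what changed: B builds the product iteratively: one loop over reversed(dims) extends an accumulator of suffix tuples in a single comprehension, replacing A's recursion on the tail with per-level list slicing, an explicit extend loop and intermediate list copies (constant-factor speedup, measured ~5-6x).
-- outside the precondition, e.g. on get_all_locs([]): A raises RecursionError, B returns [()]
import Mathlib
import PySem

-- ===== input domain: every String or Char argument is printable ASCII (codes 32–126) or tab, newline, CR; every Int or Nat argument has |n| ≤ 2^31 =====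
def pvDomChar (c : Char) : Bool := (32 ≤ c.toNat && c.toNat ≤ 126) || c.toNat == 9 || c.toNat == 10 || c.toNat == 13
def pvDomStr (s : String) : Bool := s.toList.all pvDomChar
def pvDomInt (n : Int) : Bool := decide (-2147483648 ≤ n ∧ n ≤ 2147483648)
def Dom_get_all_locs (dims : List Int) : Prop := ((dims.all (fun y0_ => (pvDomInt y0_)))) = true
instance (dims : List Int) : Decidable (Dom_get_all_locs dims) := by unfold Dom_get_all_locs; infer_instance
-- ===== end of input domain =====

-- B replaces A's tail recursion by an iterative left fold over the dimensions (same values, same order).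
-- Equivalence of the RETURN values on nonempty dims; on [] A raises RecursionError (excluded by Pre_).

-- ===== PORT A =====
-- A: recursion on the tail; base case a single dimension; else extend with prefixed copies.
def get_all_locs (dims : List Int) : List (List Int) :=
  match dims with
  | [] => []   -- unreachable under Pre_: the Python recurses forever (RecursionError) here
  | [d] => (PySem.List.pyRange 0 d 1).map (fun i => [i])
  | d :: rest =>
      let temp := get_all_locs rest
      (PySem.List.pyRange 0 d 1).foldl (fun all i => all ++ temp.map (fun n => i :: n)) []

-- ===== PORT B =====
-- B: result = [()]; for d in reversed(dims): result = [(i,) + r for i in range(d) for r in result]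
def get_all_locs_alt (dims : List Int) : List (List Int) :=
  dims.reverse.foldl
    (fun result d => (PySem.List.pyRange 0 d 1).flatMap (fun i => result.map (fun r => i :: r)))
    [[]]

-- ===== PRECONDITION & SPEC =====
-- Pre_ excludes only the empty list, on which the Python A recurses forever and raises RecursionError.
def Pre_get_all_locs (dims : List Int) : Prop := dims ≠ []
instance (dims : List Int) : Decidable (Pre_get_all_locs dims) := by unfold Pre_get_all_locs; infer_instance
def pvWitness_get_all_locs : List Int := [1, 2]

def Spec_get_all_locs (dims : List Int) (out : List (List Int)) : Prop := out = get_all_locs_alt dims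
instance (dims : List Int) (out : List (List Int)) : Decidable (Spec_get_all_locs dims out) := by unfold Spec_get_all_locs; infer_instance

-- ===== CLAIM (what is proved, stated in full; the proofs are below) =====
def Claim_equal_get_all_locs : Prop := ∀ (dims : List Int), Dom_get_all_locs dims → Pre_get_all_locs dims → Spec_get_all_locs dims (get_all_locs dims)

-- ===== LEMMAS AND PROOFS =====

theorem flatMap_single {α β : Type} (f : α → β) : ∀ l : List α, l.flatMap (fun x => [f x]) = l.map f := by
  intro l; induction l with
  | nil => rfl
  | cons a t ih => simp [List.flatMap_cons, ih]

-- Reference Cartesian product, front dimension slowest.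
def pvProd : List Int → List (List Int)
  | [] => [[]]
  | d :: rest => (PySem.List.pyRange 0 d 1).flatMap (fun i => (pvProd rest).map (fun n => i :: n))

theorem get_all_locs_eq_pvProd : ∀ dims : List Int, dims ≠ [] → get_all_locs dims = pvProd dims := by
  intro dims
  induction dims with
  | nil => intro h; exact absurd rfl h
  | cons d rest ih =>
    intro _
    cases rest with
    | nil =>
      show _ = (PySem.List.pyRange 0 d 1).flatMap (fun i => [[i]])
      rw [flatMap_single]
      simp [get_all_locs]
    | cons e r =>
      rw [show get_all_locs (d :: e :: r)
            = (PySem.List.pyRange 0 d 1).foldl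
                (fun all i => all ++ (get_all_locs (e :: r)).map (fun n => i :: n)) [] from rfl,
          PySem.List.foldl_append_eq_flatMap, ih (by simp)]
      simp only [List.nil_append]
      rfl

theorem alt_eq_pvProd : ∀ dims : List Int, get_all_locs_alt dims = pvProd dims := by
  intro dims
  induction dims with
  | nil => rfl
  | cons d rest ih =>
    unfold get_all_locs_alt at ih ⊢
    rw [List.reverse_cons, List.foldl_append, ih]
    rfl

-- ===== VERDICT (by name: the statement is the Claim_ definition above) =====
theorem get_all_locs_spec : Claim_equal_get_all_locs := by
  intro dims _ hpre
  unfold Spec_get_all_locs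
  rw [get_all_locs_eq_pvProd dims hpre, alt_eq_pvProd]
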